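-- pv_equiv track=rewrite | github.com/adit0503/HackerEarth-Coding-Challenges | Amazon_SDE/problem1.py | solve
-- ===== SOURCE A (Python) =====
-- def solve(N, A):
--
--     def gcd(a,b):
--         if b==0:
--             return a
--         return gcd(b,a%b)
--
--     GCD = {}
--     for i in range(2*N):
--         for j in range(i+1,2*N):
--             g = gcd(A[i], A[j])
--             GCD[g] = GCD.get(g, []) + [(A[i],A[j])]
--
--     ans, n = 0, N
--     visited = set()
--     for k in sorted(GCD.keys(), reverse=True):
--         for x,y in GCD[k]:
--             if x not in visited and y not in visited:
--                 visited.add(x)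
--                 visited.add(y)
--                 ans += k*n
--                 n = max(n-1,0)
--     return ans
-- ===== SOURCE B (Python) =====
-- def solve(N, A):
--
--     def gcd(a, b):
--         if b == 0:
--             return a
--         return gcd(b, a % b)
--
--     M = 2 * N
--     pairs = [(gcd(A[i], A[j]), A[i], A[j]) for i in range(M) for j in range(i + 1, M)]
--
--     ans, n = 0, N
--     visited = set()
--     while n > 0:
--         best = None
--         for g, x, y in pairs:
--             if x not in visited and y not in visited and (best is None or best[0] < g):
--                 best = (g, x, y)
--         if best is None:
--             break
--         g, x, y = best
--         visited.add(x)
--         visited.add(y)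
--         ans += g * n
--         n -= 1
--     return ans
-- ===== Notes on version B (the rewrite author's own statement) =====
-- stated objective: alternative
-- what changed: B drops A's dict-of-gcd-buckets and the sort of its keys entirely: it repeatedly scans the flat pair list for the arg-max (highest gcd, earliest on ties) pair with both values unvisited, takes it, and stops after at most N selections (later picks contribute k*0 in A).
import Mathlib
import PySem

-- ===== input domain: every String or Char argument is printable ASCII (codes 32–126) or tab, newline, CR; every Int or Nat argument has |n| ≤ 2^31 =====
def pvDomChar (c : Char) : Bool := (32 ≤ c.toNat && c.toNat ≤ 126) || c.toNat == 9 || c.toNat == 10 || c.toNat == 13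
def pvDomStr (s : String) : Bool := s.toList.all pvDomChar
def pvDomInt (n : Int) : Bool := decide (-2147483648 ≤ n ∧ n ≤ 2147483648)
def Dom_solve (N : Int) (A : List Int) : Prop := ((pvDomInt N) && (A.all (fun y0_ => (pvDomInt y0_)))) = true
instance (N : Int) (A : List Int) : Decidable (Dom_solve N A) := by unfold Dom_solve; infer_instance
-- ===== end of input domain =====

-- B replaces A's dict-of-gcd-buckets and its sort of the keys by repeated linear arg-max
-- selection over the flat pair list (no sorting, no buckets), stopping after N picks;
-- objective: alternative.

-- helper shared by both Pythons: each defines the same recursive gcd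
theorem pvGcdDec (a b : Int) (h : ¬ b = 0) : (PySem.Int.mod a b).natAbs < b.natAbs := by
  rcases lt_or_gt_of_ne h with hb | hb
  · have := PySem.Int.mod_neg_bounds a hb; omega
  · have h1 := PySem.Int.mod_nonneg a hb; have h2 := PySem.Int.mod_lt a hb; omega

def pyGcd (a b : Int) : Int :=
  if h : b = 0 then a else pyGcd b (PySem.Int.mod a b)
termination_by b.natAbs
decreasing_by exact pvGcdDec a b h

-- ===== PORT A =====
-- GCD[k] in the greedy loop cannot raise (k comes from GCD's keys); ported as getD with default [].
def solve (N : Int) (A : List Int) : Int :=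
  let GCD := (PySem.List.pyRange 0 (2*N) 1).foldl (fun d i =>
      (PySem.List.pyRange (i+1) (2*N) 1).foldl (fun d j =>
        let g := pyGcd (PySem.List.pyGetD A i 0) (PySem.List.pyGetD A j 0)
        d.insert g (d.getD g [] ++ [(PySem.List.pyGetD A i 0, PySem.List.pyGetD A j 0)])) d)
    (PySem.Dict.empty : PySem.Dict Int (List (Int × Int)))
  let r := (PySem.List.sorted GCD.keys (fun k => k) true).foldl (fun s k =>
      (GCD.getD k []).foldl (fun s xy =>
        if !(PySem.Set.contains s.2.2 xy.1) && !(PySem.Set.contains s.2.2 xy.2) then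
          (s.1 + k * s.2.1, max (s.2.1 - 1) 0, PySem.Set.add (PySem.Set.add s.2.2 xy.1) xy.2)
        else s) s)
    ((0 : Int), N, (PySem.Set.empty : PySem.Set Int))
  r.1

-- ===== PORT B =====
-- B's inner for-loop: one left-to-right scan keeping the first strict-max valid pair
def pvScan (v : PySem.Set Int) (pairs : List (Int × Int × Int)) : Option (Int × Int × Int) :=
  pairs.foldl (fun best t =>
    if !(PySem.Set.contains v t.2.1) && !(PySem.Set.contains v t.2.2) &&
        (match best with | none => true | some b => decide (b.1 < t.1))
    then some t else best) none

-- B's while-loop: n strictly decreases while positive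
def solveAltLoop (pairs : List (Int × Int × Int)) (ans n : Int) (v : PySem.Set Int) : Int :=
  if h : 0 < n then
    match pvScan v pairs with
    | none => ans
    | some t =>
        solveAltLoop pairs (ans + t.1 * n) (n - 1) (PySem.Set.add (PySem.Set.add v t.2.1) t.2.2)
  else ans
termination_by n.toNat
decreasing_by omega

def solve_alt (N : Int) (A : List Int) : Int :=
  let pairs := (PySem.List.pyRange 0 (2*N) 1).flatMap (fun i =>
      (PySem.List.pyRange (i+1) (2*N) 1).map (fun j =>
        (pyGcd (PySem.List.pyGetD A i 0) (PySem.List.pyGetD A j 0),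
         PySem.List.pyGetD A i 0, PySem.List.pyGetD A j 0)))
  solveAltLoop pairs 0 N PySem.Set.empty

-- ===== PRECONDITION & SPEC =====
-- Pre_ excludes exactly the inputs where Python A raises IndexError on A[i]/A[j] (list shorter than 2*N).
def Pre_solve (N : Int) (A : List Int) : Prop := 2 * N ≤ (A.length : Int)
instance (N : Int) (A : List Int) : Decidable (Pre_solve N A) := by unfold Pre_solve; infer_instance
def pvWitness_solve : Int × List Int := (1, [2, 4])

def Spec_solve (N : Int) (A : List Int) (out : Int) : Prop := out = solve_alt N A
instance (N : Int) (A : List Int) (out : Int) : Decidable (Spec_solve N A out) := by unfold Spec_solve; infer_instance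

-- ===== CLAIM (what is proved, stated in full; the proofs are below) =====
def Claim_equal_solve : Prop := ∀ (N : Int) (A : List Int), Dom_solve N A → Pre_solve N A → Spec_solve N A (solve N A)

-- ===== LEMMAS AND PROOFS =====

-- the flat pair list both sides traverse
def pvPairs (N : Int) (A : List Int) : List (Int × Int × Int) :=
  (PySem.List.pyRange 0 (2*N) 1).flatMap (fun i =>
      (PySem.List.pyRange (i+1) (2*N) 1).map (fun j =>
        (pyGcd (PySem.List.pyGetD A i 0) (PySem.List.pyGetD A j 0),
         PySem.List.pyGetD A i 0, PySem.List.pyGetD A j 0)))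

def pvStep (d : PySem.Dict Int (List (Int × Int))) (p : Int × Int × Int) :
    PySem.Dict Int (List (Int × Int)) := d.modify p.1 [] (fun v => v ++ [p.2])

def pvBody (s : Int × Int × PySem.Set Int) (t : Int × Int × Int) : Int × Int × PySem.Set Int :=
  if !(PySem.Set.contains s.2.2 t.2.1) && !(PySem.Set.contains s.2.2 t.2.2) then
    (s.1 + t.1 * s.2.1, max (s.2.1 - 1) 0, PySem.Set.add (PySem.Set.add s.2.2 t.2.1) t.2.2)
  else s

-- "both endpoints unvisited"
def pvValid (v : PySem.Set Int) (t : Int × Int × Int) : Bool :=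
  !(PySem.Set.contains v t.2.1) && !(PySem.Set.contains v t.2.2)

lemma keys_pvStep (d : PySem.Dict Int (List (Int × Int))) (p : Int × Int × Int) :
    (pvStep d p).keys = PySem.Set.add d.keys p.1 := by
  simp only [pvStep, PySem.Dict.modify, PySem.Dict.insert, PySem.Set.add, PySem.Set.contains,
    PySem.Dict.keys, PySem.Dict.contains]
  by_cases h : (d.items.any fun q => q.1 == p.1) = true
  · have hc : (List.contains (d.items.map (fun q => q.1)) p.1) = true := by
      simp only [List.any_eq_true] at h
      obtain ⟨q, hq, hb⟩ := h
      simp only [List.contains_eq_any_beq, List.any_map, List.any_eq_true]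
      exact ⟨q, hq, beq_iff_eq.mpr (beq_iff_eq.mp hb).symm⟩
    simp only [h, if_true, hc, List.map_map]
    apply List.map_congr_left
    intro q hq
    simp only [Function.comp_apply]
    by_cases hb : (q.1 == p.1) = true
    · rw [if_pos hb]; exact (beq_iff_eq.mp hb).symm
    · rw [if_neg hb]
  · have hc : (List.contains (d.items.map (fun q => q.1)) p.1) = false := by
      simp only [List.any_eq_true] at h
      simp only [List.contains_eq_any_beq, List.any_map, List.any_eq_false]
      intro q hq
      simp only [Function.comp_apply, beq_iff_eq]
      intro he
      exact absurd ⟨q, hq, beq_iff_eq.mpr he.symm⟩ h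
    simp only [Bool.not_eq_true] at h
    simp only [h, hc, Bool.false_eq_true, if_false, List.map_append, List.map_cons, List.map_nil]

lemma keys_foldl_pvStep (l : List (Int × Int × Int)) (d : PySem.Dict Int (List (Int × Int))) :
    (l.foldl pvStep d).keys = (l.map (fun p => p.1)).foldl PySem.Set.add d.keys := by
  induction l generalizing d with
  | nil => rfl
  | cons p t ih => simp [List.foldl_cons, ih, keys_pvStep]

lemma keys_pvDict (l : List (Int × Int × Int)) :
    (l.foldl pvStep PySem.Dict.empty).keys = PySem.Set.ofList (l.map (fun p => p.1)) := by
  rw [keys_foldl_pvStep, PySem.Set.ofList_eq_foldl]; rfl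

lemma getD_pvDict (l : List (Int × Int × Int)) (k : Int) :
    (l.foldl pvStep PySem.Dict.empty).getD k [] =
      (l.filter (fun p => p.1 == k)).map (fun p => p.2) := by
  have h := PySem.Dict.getD_foldl_modify_append (l := l) (d := (PySem.Dict.empty : PySem.Dict Int (List (Int × Int)))) (c := k)
  have e : l.foldl pvStep PySem.Dict.empty =
      List.foldl (fun d p => d.modify p.1 [] fun x => x ++ [p.2]) PySem.Dict.empty l := rfl
  rw [e, h]
  simp [PySem.Dict.empty, PySem.Dict.getD, PySem.Dict.get?]

lemma insertBy_split {α : Type} (bf : α → α → Bool) (x : α) (l₁ l₂ : List α)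
    (h₁ : ∀ y ∈ l₁, bf x y = false)
    (h₂ : ∀ z t, l₂ = z :: t → bf x z = true) :
    PySem.List.insertBy bf x (l₁ ++ l₂) = l₁ ++ x :: l₂ := by
  induction l₁ with
  | nil =>
    cases l₂ with
    | nil => simp [PySem.List.insertBy]
    | cons z t => simp [PySem.List.insertBy, h₂ z t rfl]
  | cons a l₁ ih =>
    have ha : bf x a = false := h₁ a (by simp)
    simp only [List.cons_append, PySem.List.insertBy, ha]
    simp [ih (fun y hy => h₁ y (by simp [hy]))]

-- A stable descending sort of the pair list is the concatenation of its gcd-groups,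
-- in original order, listed by strictly descending gcd.
lemma grouped_eq_sorted (ps : List (Int × Int × Int)) (L : List Int)
    (hmem : ∀ g, g ∈ L ↔ g ∈ ps.map (fun p => p.1))
    (hlt : L.Pairwise (fun a b => b < a)) :
    L.flatMap (fun k => ps.filter (fun p => p.1 == k)) =
      PySem.List.sorted ps (fun p => p.1) true := by
  induction ps using List.reverseRecOn generalizing L with
  | nil => simp [PySem.List.sorted]
  | append_singleton ps x ih =>
    have hg : x.1 ∈ L := (hmem x.1).2 (by simp)
    obtain ⟨L₁, L₂, hL⟩ := List.append_of_mem hg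
    subst hL
    have hlt0 := hlt
    rw [List.pairwise_append] at hlt
    obtain ⟨h1, hc, hx⟩ := hlt
    rw [List.pairwise_cons] at hc
    obtain ⟨h2g, h2⟩ := hc
    have hL1 : ∀ a ∈ L₁, x.1 < a := fun a ha => hx a ha x.1 (by simp)
    rw [PySem.List.sorted_rev_eq_foldl_insertBy, List.foldl_append, List.foldl_cons, List.foldl_nil,
      ← PySem.List.sorted_rev_eq_foldl_insertBy]
    have hfL1 : ∀ k ∈ L₁, List.filter (fun p => p.1 == k) (ps ++ [x]) =
        List.filter (fun p => p.1 == k) ps := by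
      intro k hk
      have hne : (x.1 == k) = false := by
        have := hL1 k hk; simp only [beq_eq_false_iff_ne, ne_eq]; omega
      simp [List.filter_append, hne]
    have hfL2 : ∀ k ∈ L₂, List.filter (fun p => p.1 == k) (ps ++ [x]) =
        List.filter (fun p => p.1 == k) ps := by
      intro k hk
      have hne : (x.1 == k) = false := by
        have := h2g k hk; simp only [beq_eq_false_iff_ne, ne_eq]; omega
      simp [List.filter_append, hne]
    have hfg : List.filter (fun p => p.1 == x.1) (ps ++ [x]) =
        List.filter (fun p => p.1 == x.1) ps ++ [x] := by
      simp [List.filter_append]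
    have hkey1 : ∀ y ∈ L₁.flatMap (fun k => List.filter (fun p => p.1 == k) ps), x.1 < y.1 := by
      intro y hy
      rw [List.mem_flatMap] at hy
      obtain ⟨k, hk, hyf⟩ := hy
      have he : y.1 = k := beq_iff_eq.mp (List.mem_filter.mp hyf).2
      exact he ▸ hL1 k hk
    have hkey2 : ∀ y ∈ L₂.flatMap (fun k => List.filter (fun p => p.1 == k) ps), y.1 < x.1 := by
      intro y hy
      rw [List.mem_flatMap] at hy
      obtain ⟨k, hk, hyf⟩ := hy
      have he : y.1 = k := beq_iff_eq.mp (List.mem_filter.mp hyf).2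
      exact he ▸ h2g k hk
    rw [List.flatMap_append, List.flatMap_cons,
      List.flatMap_congr hfL1, List.flatMap_congr hfL2, hfg]
    by_cases hgps : x.1 ∈ ps.map (fun p => p.1)
    · have hm' : ∀ g, g ∈ L₁ ++ x.1 :: L₂ ↔ g ∈ ps.map (fun p => p.1) := by
        intro g
        constructor
        · intro hgL
          have hmm := (hmem g).1 hgL
          simp only [List.map_append, List.map_cons, List.map_nil, List.mem_append,
            List.mem_cons, List.not_mem_nil, or_false] at hmm
          rcases hmm with h | h
          · exact h
          · exact h ▸ hgps
        · intro h
          exact (hmem g).2 (by simp [List.map_append, h])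
      rw [← ih (L₁ ++ x.1 :: L₂) hm' hlt0, List.flatMap_append, List.flatMap_cons]
      have hins := insertBy_split (fun a b => decide (b.1 < a.1)) x
          (L₁.flatMap (fun k => List.filter (fun p => p.1 == k) ps) ++
            List.filter (fun p => p.1 == x.1) ps)
          (L₂.flatMap (fun k => List.filter (fun p => p.1 == k) ps))
          (by
            intro y hy
            rcases List.mem_append.mp hy with hy | hy
            · have := hkey1 y hy; simp only [decide_eq_false_iff_not]; omega
            · have he : y.1 = x.1 := beq_iff_eq.mp (List.mem_filter.mp hy).2
              simp only [decide_eq_false_iff_not]; omega)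
          (by
            intro z t he
            have hz : z ∈ L₂.flatMap (fun k => List.filter (fun p => p.1 == k) ps) := by
              rw [he]; exact List.mem_cons_self
            have := hkey2 z hz
            simp only [decide_eq_true_eq]; omega)
      rw [List.append_assoc] at hins
      rw [hins]
      simp
    · have hm' : ∀ g, g ∈ L₁ ++ L₂ ↔ g ∈ ps.map (fun p => p.1) := by
        intro g
        constructor
        · intro hgL
          have hgL' : g ∈ L₁ ++ x.1 :: L₂ := by
            rcases List.mem_append.mp hgL with h | h
            · exact List.mem_append.mpr (Or.inl h)
            · exact List.mem_append.mpr (Or.inr (List.mem_cons_of_mem _ h))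
          have hmm := (hmem g).1 hgL'
          simp only [List.map_append, List.map_cons, List.map_nil, List.mem_append,
            List.mem_cons, List.not_mem_nil, or_false] at hmm
          rcases hmm with h | h
          · exact h
          · exfalso
            rcases List.mem_append.mp hgL with h' | h'
            · have := hL1 g h'; omega
            · have := h2g g h'; omega
        · intro h
          have hgL : g ∈ L₁ ++ x.1 :: L₂ := (hmem g).2 (by simp [List.map_append, h])
          have hne : g ≠ x.1 := fun he => hgps (he ▸ h)
          rcases List.mem_append.mp hgL with h' | h'
          · exact List.mem_append.mpr (Or.inl h')
          · rcases List.mem_cons.mp h' with h'' | h''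
            · exact absurd h'' hne
            · exact List.mem_append.mpr (Or.inr h'')
      have hp' : (L₁ ++ L₂).Pairwise (fun a b => b < a) :=
        List.pairwise_append.mpr ⟨h1, h2, fun a ha b hb => hx a ha b (List.mem_cons_of_mem _ hb)⟩
      have hfgnil : List.filter (fun p => p.1 == x.1) ps = [] := by
        rw [List.filter_eq_nil_iff]
        intro p hp hb
        exact hgps (List.mem_map.mpr ⟨p, hp, beq_iff_eq.mp hb⟩)
      rw [← ih (L₁ ++ L₂) hm' hp', hfgnil, List.flatMap_append]
      have hins := insertBy_split (fun a b => decide (b.1 < a.1)) x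
          (L₁.flatMap (fun k => List.filter (fun p => p.1 == k) ps))
          (L₂.flatMap (fun k => List.filter (fun p => p.1 == k) ps))
          (by
            intro y hy
            have := hkey1 y hy; simp only [decide_eq_false_iff_not]; omega)
          (by
            intro z t he
            have hz : z ∈ L₂.flatMap (fun k => List.filter (fun p => p.1 == k) ps) := by
              rw [he]; exact List.mem_cons_self
            have := hkey2 z hz
            simp only [decide_eq_true_eq]; omega)
      rw [hins]
      simp

lemma dict_eq (N : Int) (A : List Int) :
    ((PySem.List.pyRange 0 (2*N) 1).foldl (fun d i =>
      (PySem.List.pyRange (i+1) (2*N) 1).foldl (fun d j =>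
        let g := pyGcd (PySem.List.pyGetD A i 0) (PySem.List.pyGetD A j 0)
        d.insert g (d.getD g [] ++ [(PySem.List.pyGetD A i 0, PySem.List.pyGetD A j 0)])) d)
    (PySem.Dict.empty : PySem.Dict Int (List (Int × Int)))) =
      (pvPairs N A).foldl pvStep PySem.Dict.empty := by
  simp only [pvPairs, List.foldl_flatMap, List.foldl_map, pvStep, PySem.Dict.modify]

lemma solveA_eq (N : Int) (A : List Int) :
    solve N A =
      ((PySem.List.sorted (pvPairs N A) (fun p => p.1) true).foldl pvBody
        ((0 : Int), N, (PySem.Set.empty : PySem.Set Int))).1 := by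
  unfold solve
  rw [dict_eq]
  show ((PySem.List.sorted ((pvPairs N A).foldl pvStep PySem.Dict.empty).keys (fun k => k) true).foldl
      (fun s k => (((pvPairs N A).foldl pvStep PySem.Dict.empty).getD k []).foldl
        (fun s xy =>
          if !(PySem.Set.contains s.2.2 xy.1) && !(PySem.Set.contains s.2.2 xy.2) then
            (s.1 + k * s.2.1, max (s.2.1 - 1) 0,
              PySem.Set.add (PySem.Set.add s.2.2 xy.1) xy.2)
          else s) s)
      ((0 : Int), N, (PySem.Set.empty : PySem.Set Int))).1 = _
  rw [keys_pvDict]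
  simp only [getD_pvDict, List.foldl_map]
  have hcongr : ∀ (k : Int) (s : Int × Int × PySem.Set Int),
      (List.filter (fun p => p.1 == k) (pvPairs N A)).foldl
        (fun s xy => if !(PySem.Set.contains s.2.2 xy.2.1) && !(PySem.Set.contains s.2.2 xy.2.2) then
            (s.1 + k * s.2.1, max (s.2.1 - 1) 0,
              PySem.Set.add (PySem.Set.add s.2.2 xy.2.1) xy.2.2)
          else s) s =
      (List.filter (fun p => p.1 == k) (pvPairs N A)).foldl pvBody s := by
    intro k s
    apply PySem.List.foldl_congr_mem
    intro acc p hp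
    have he : p.1 = k := beq_iff_eq.mp (List.mem_filter.mp hp).2
    simp [pvBody, he]
  have houter : (PySem.List.sorted (PySem.Set.ofList ((pvPairs N A).map (fun p => p.1)))
        (fun k => k) true).foldl
      (fun s k => (List.filter (fun p => p.1 == k) (pvPairs N A)).foldl
        (fun s xy =>
          if !(PySem.Set.contains s.2.2 xy.2.1) && !(PySem.Set.contains s.2.2 xy.2.2) then
            (s.1 + k * s.2.1, max (s.2.1 - 1) 0,
              PySem.Set.add (PySem.Set.add s.2.2 xy.2.1) xy.2.2)
          else s) s)
      ((0 : Int), N, (PySem.Set.empty : PySem.Set Int)) =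
    (PySem.List.sorted (PySem.Set.ofList ((pvPairs N A).map (fun p => p.1)))
        (fun k => k) true).foldl
      (fun s k => (List.filter (fun p => p.1 == k) (pvPairs N A)).foldl pvBody s)
      ((0 : Int), N, (PySem.Set.empty : PySem.Set Int)) :=
    PySem.List.foldl_congr_mem _ _ _ _ (fun s k _ => hcongr k s)
  rw [houter]
  rw [← List.foldl_flatMap]
  have hmemL : ∀ g, g ∈ PySem.List.sorted
      (PySem.Set.ofList ((pvPairs N A).map (fun p => p.1))) (fun k => k) true ↔
      g ∈ (pvPairs N A).map (fun p => p.1) := by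
    intro g
    rw [PySem.List.mem_sorted, PySem.Set.mem_ofList]
  have hltL : (PySem.List.sorted
      (PySem.Set.ofList ((pvPairs N A).map (fun p => p.1))) (fun k => k) true).Pairwise
      (fun a b => b < a) := by
    have hnd : (PySem.List.sorted
        (PySem.Set.ofList ((pvPairs N A).map (fun p => p.1))) (fun k => k) true).Nodup :=
      (PySem.List.sorted_perm _ _ true).nodup_iff.mpr
        (PySem.Set.nodup_ofList ((pvPairs N A).map (fun p => p.1)))
    have hple := PySem.List.sorted_pairwise_rev
      (PySem.Set.ofList ((pvPairs N A).map (fun p => p.1))) (fun k => k)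
    exact (hple.and hnd).imp (fun h => lt_of_le_of_ne h.1 (Ne.symm h.2))
  rw [grouped_eq_sorted (pvPairs N A) _ hmemL hltL]

-- ---------- new machinery for B ----------

lemma pvBody_invalid (s : Int × Int × PySem.Set Int) (t : Int × Int × Int)
    (h : pvValid s.2.2 t = false) : pvBody s t = s := by
  simp only [pvBody, pvValid] at *
  rw [if_neg (by rw [h]; exact Bool.false_ne_true)]

lemma pvBody_valid (s : Int × Int × PySem.Set Int) (t : Int × Int × Int)
    (h : pvValid s.2.2 t = true) :
    pvBody s t = (s.1 + t.1 * s.2.1, max (s.2.1 - 1) 0,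
      PySem.Set.add (PySem.Set.add s.2.2 t.2.1) t.2.2) := by
  simp only [pvBody, pvValid] at *
  rw [if_pos h]

lemma contains_add_self (v : PySem.Set Int) (x : Int) :
    PySem.Set.contains (PySem.Set.add v x) x = true := by
  simp [PySem.Set.contains, PySem.Set.mem_add]

lemma contains_add_mono (v : PySem.Set Int) (x y : Int)
    (h : PySem.Set.contains v y = true) :
    PySem.Set.contains (PySem.Set.add v x) y = true := by
  simp [PySem.Set.contains, PySem.Set.mem_add] at h ⊢
  exact Or.inl h

lemma valid_mono (v : PySem.Set Int) (x y : Int) (t : Int × Int × Int)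
    (h : pvValid v t = false) :
    pvValid (PySem.Set.add (PySem.Set.add v x) y) t = false := by
  unfold pvValid at h ⊢
  rcases Bool.and_eq_false_iff.mp h with h | h
  · have hc : PySem.Set.contains v t.2.1 = true := by
      cases hcv : PySem.Set.contains v t.2.1
      · rw [hcv] at h; simp at h
      · rfl
    have h2 := contains_add_mono _ y _ (contains_add_mono _ x _ hc)
    rw [h2]; rfl
  · have hc : PySem.Set.contains v t.2.2 = true := by
      cases hcv : PySem.Set.contains v t.2.2
      · rw [hcv] at h; simp at h
      · rfl
    have h2 := contains_add_mono _ y _ (contains_add_mono _ x _ hc)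
    rw [h2]
    cases PySem.Set.contains (PySem.Set.add (PySem.Set.add v x) y) t.2.1 <;> rfl

lemma foldl_skip (L : List (Int × Int × Int)) (s : Int × Int × PySem.Set Int)
    (h : ∀ u ∈ L, pvValid s.2.2 u = false) : L.foldl pvBody s = s := by
  induction L with
  | nil => rfl
  | cons u L ih =>
    rw [List.foldl_cons, pvBody_invalid s u (h u (by simp))]
    exact ih (fun u hu => h u (by simp [hu]))

lemma foldl_n_zero (L : List (Int × Int × Int)) (a : Int) (v : PySem.Set Int) :
    (L.foldl pvBody (a, 0, v)).1 = a := by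
  induction L generalizing v with
  | nil => rfl
  | cons u L ih =>
    rw [List.foldl_cons]
    by_cases h : pvValid v u = true
    · rw [pvBody_valid (a, 0, v) u h]
      simpa using ih _
    · rw [pvBody_invalid (a, 0, v) u (by simpa using h)]
      exact ih v

-- characterisation of B's arg-max scan
lemma scan_spec (P : List (Int × Int × Int)) (v : PySem.Set Int) :
    (pvScan v P = none ∧ ∀ u ∈ P, pvValid v u = false) ∨
    (∃ t Q₁ Q₂, pvScan v P = some t ∧ P = Q₁ ++ t :: Q₂ ∧ pvValid v t = true ∧
      (∀ u ∈ Q₁, pvValid v u = true → u.1 < t.1) ∧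
      (∀ u ∈ P, pvValid v u = true → u.1 ≤ t.1)) := by
  induction P using List.reverseRecOn with
  | nil => exact Or.inl ⟨rfl, by simp⟩
  | append_singleton P x ih =>
    have hstep : pvScan v (P ++ [x]) =
        if pvValid v x && (match pvScan v P with | none => true | some b => decide (b.1 < x.1))
        then some x else pvScan v P := by
      simp [pvScan, List.foldl_append, pvValid]
    rcases ih with ⟨hn, hall⟩ | ⟨t, Q₁, Q₂, hs, hdec, hv, hq1, hle⟩
    · rw [hn] at hstep
      by_cases hx : pvValid v x = true
      · refine Or.inr ⟨x, P, [], ?_, by simp, hx, ?_, ?_⟩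
        · rw [hstep]; simp [hx]
        · intro u hu hvu; exact absurd hvu (by simp [hall u hu])
        · intro u hu hvu
          rcases List.mem_append.mp hu with h | h
          · exact absurd hvu (by simp [hall u h])
          · simp at h; subst h; exact le_refl _
      · refine Or.inl ⟨?_, ?_⟩
        · rw [hstep]; simp [Bool.eq_false_iff.mpr hx]
        · intro u hu
          rcases List.mem_append.mp hu with h | h
          · exact hall u h
          · simp at h; subst h; exact Bool.eq_false_iff.mpr hx
    · rw [hs] at hstep
      by_cases hcond : (pvValid v x && decide (t.1 < x.1)) = true
      · have hcond' : pvValid v x = true ∧ t.1 < x.1 := by simpa using hcond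
        have hx := hcond'.1
        have hlt : t.1 < x.1 := hcond'.2
        refine Or.inr ⟨x, P, [], ?_, by simp, hx, ?_, ?_⟩
        · rw [hstep]; simp [hcond]
        · intro u hu hvu
          exact lt_of_le_of_lt (hle u hu hvu) hlt
        · intro u hu hvu
          rcases List.mem_append.mp hu with h | h
          · exact le_of_lt (lt_of_le_of_lt (hle u h hvu) hlt)
          · simp at h; subst h; exact le_refl _
      · refine Or.inr ⟨t, Q₁, Q₂ ++ [x], ?_, by rw [hdec]; simp, hv, hq1, ?_⟩
        · rw [hstep]; simp only [hcond, Bool.false_eq_true, if_false]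
        · intro u hu hvu
          rcases List.mem_append.mp hu with h | h
          · exact hle u h hvu
          · simp at h; subst h
            have : ¬ (t.1 < u.1) := by
              intro hlt
              exact hcond (by simp [hvu, hlt])
            omega

-- the main loop equivalence: B's repeated arg-max equals A's single greedy pass over the sorted list
lemma loop_eq (P : List (Int × Int × Int)) :
    ∀ (m : Nat) (n : Int), n.toNat = m → 0 ≤ n → ∀ (a : Int) (v : PySem.Set Int),
      solveAltLoop P a n v =
        ((PySem.List.sorted P (fun p => p.1) true).foldl pvBody (a, n, v)).1 := by
  intro m
  induction m with
  | zero =>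
    intro n hm hn a v
    have hn0 : n = 0 := by omega
    subst hn0
    rw [solveAltLoop, dif_neg (by omega), foldl_n_zero]
  | succ m ih =>
    intro n hm hn a v
    have hpos : 0 < n := by omega
    rcases scan_spec P v with ⟨hnone, hall⟩ | ⟨t, Q₁, Q₂, hsome, hdec, hv, hq1, hle⟩
    · rw [solveAltLoop, dif_pos hpos, hnone]
      have hallS : ∀ u ∈ PySem.List.sorted P (fun p => p.1) true, pvValid v u = false :=
        fun u hu => hall u ((PySem.List.mem_sorted _ _ _ _).mp hu)
      rw [foldl_skip _ _ hallS]
    · -- decompose the sorted list around t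
      have hmemL : ∀ g, g ∈ PySem.List.sorted
          (PySem.Set.ofList (P.map (fun p => p.1))) (fun k => k) true ↔
          g ∈ P.map (fun p => p.1) := by
        intro g; rw [PySem.List.mem_sorted, PySem.Set.mem_ofList]
      have hltL : (PySem.List.sorted
          (PySem.Set.ofList (P.map (fun p => p.1))) (fun k => k) true).Pairwise
          (fun a b => b < a) := by
        have hnd : (PySem.List.sorted
            (PySem.Set.ofList (P.map (fun p => p.1))) (fun k => k) true).Nodup :=
          (PySem.List.sorted_perm _ _ true).nodup_iff.mpr
            (PySem.Set.nodup_ofList (P.map (fun p => p.1)))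
        have hple := PySem.List.sorted_pairwise_rev
          (PySem.Set.ofList (P.map (fun p => p.1))) (fun k => k)
        exact (hple.and hnd).imp (fun h => lt_of_le_of_ne h.1 (Ne.symm h.2))
      set K := PySem.List.sorted (PySem.Set.ofList (P.map (fun p => p.1))) (fun k => k) true with hK
      have hflat : K.flatMap (fun k => P.filter (fun p => p.1 == k)) =
          PySem.List.sorted P (fun p => p.1) true :=
        grouped_eq_sorted P K hmemL hltL
      have htP : t ∈ P := by rw [hdec]; simp
      have hkK : t.1 ∈ K := (hmemL t.1).mpr (List.mem_map.mpr ⟨t, htP, rfl⟩)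
      obtain ⟨K₁, K₂, hKd⟩ := List.append_of_mem hkK
      have hltL' := hltL
      rw [hKd, List.pairwise_append] at hltL'
      obtain ⟨_, _, hK1gt⟩ := hltL'
      have hK1 : ∀ k ∈ K₁, t.1 < k := fun k hk => hK1gt k hk t.1 (by simp)
      -- the group of t's key splits at t
      have hgsplit : P.filter (fun p => p.1 == t.1) =
          Q₁.filter (fun p => p.1 == t.1) ++ t :: Q₂.filter (fun p => p.1 == t.1) := by
        rw [hdec, List.filter_append, List.filter_cons]
        simp
      -- assemble S = S₁ ++ t :: S₂
      set S₁ := K₁.flatMap (fun k => P.filter (fun p => p.1 == k)) ++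
          Q₁.filter (fun p => p.1 == t.1) with hS₁
      set S₂ := Q₂.filter (fun p => p.1 == t.1) ++
          K₂.flatMap (fun k => P.filter (fun p => p.1 == k)) with hS₂
      have hSdec : PySem.List.sorted P (fun p => p.1) true = S₁ ++ t :: S₂ := by
        rw [← hflat, hKd, List.flatMap_append, List.flatMap_cons, hgsplit, hS₁, hS₂]
        simp
      -- every element of S₁ is invalid under v
      have hS₁inv : ∀ u ∈ S₁, pvValid v u = false := by
        intro u hu
        rcases List.mem_append.mp hu with h | h
        · rw [List.mem_flatMap] at h
          obtain ⟨k, hk, huf⟩ := h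
          have he : u.1 = k := beq_iff_eq.mp (List.mem_filter.mp huf).2
          have huP : u ∈ P := (List.mem_filter.mp huf).1
          by_cases hvu : pvValid v u = true
          · have := hle u huP hvu
            have := hK1 k hk
            omega
          · exact Bool.eq_false_iff.mpr hvu
        · have he : u.1 = t.1 := beq_iff_eq.mp (List.mem_filter.mp h).2
          have huQ : u ∈ Q₁ := (List.mem_filter.mp h).1
          by_cases hvu : pvValid v u = true
          · have := hq1 u huQ hvu
            omega
          · exact Bool.eq_false_iff.mpr hvu
      set v' := PySem.Set.add (PySem.Set.add v t.2.1) t.2.2 with hv'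
      have htinv : pvValid v' t = false := by
        unfold pvValid
        rw [hv', contains_add_self]
        cases PySem.Set.contains (PySem.Set.add (PySem.Set.add v t.2.1) t.2.2) t.2.1 <;> rfl
      have hS₁inv' : ∀ u ∈ S₁, pvValid v' u = false :=
        fun u hu => valid_mono v t.2.1 t.2.2 u (hS₁inv u hu)
      have hmax : max (n - 1) 0 = n - 1 := by omega
      -- left side: one pick then recurse, then skip S₁ and the (now invalid) t
      have hL : solveAltLoop P a n v = (S₂.foldl pvBody (a + t.1 * n, n - 1, v')).1 := by
        rw [solveAltLoop, dif_pos hpos, hsome]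
        show solveAltLoop P (a + t.1 * n) (n - 1) v' = _
        rw [ih (n - 1) (by omega) (by omega) (a + t.1 * n) v', hSdec, List.foldl_append,
          List.foldl_cons, foldl_skip S₁ (a + t.1 * n, n - 1, v') hS₁inv',
          pvBody_invalid (a + t.1 * n, n - 1, v') t htinv]
      -- right side: skip S₁, take t
      have hR : ((PySem.List.sorted P (fun p => p.1) true).foldl pvBody (a, n, v)).1 =
          (S₂.foldl pvBody (a + t.1 * n, n - 1, v')).1 := by
        rw [hSdec, List.foldl_append, List.foldl_cons, foldl_skip S₁ (a, n, v) hS₁inv,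
          pvBody_valid (a, n, v) t hv]
        show (S₂.foldl pvBody (a + t.1 * n, max (n - 1) 0, v')).1 = _
        rw [hmax]
      rw [hL, hR]

lemma pvPairs_neg (N : Int) (A : List Int) (h : N < 0) : pvPairs N A = [] := by
  unfold pvPairs
  rw [PySem.List.pyRange_one_eq_nil (by omega)]
  rfl

-- ===== VERDICT (by name: the statement is the Claim_ definition above) =====
theorem solve_spec : Claim_equal_solve := by
  intro N A _ _
  unfold Spec_solve
  rw [solveA_eq]
  show _ = solve_alt N A
  have halt : solve_alt N A = solveAltLoop (pvPairs N A) 0 N PySem.Set.empty := rfl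
  rw [halt]
  by_cases hN : 0 ≤ N
  · rw [loop_eq (pvPairs N A) N.toNat N rfl hN 0 PySem.Set.empty]
  · rw [pvPairs_neg N A (by omega)]
    rw [solveAltLoop, dif_neg (by omega)]
    simp [PySem.List.sorted]
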